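-- pv_equiv track=rewrite | github.com/Akshaya1408/Even_Numbers_In_A_Range | EvenNumbersInRange.py | evenNumInRange
-- ===== SOURCE A (Python) =====
-- def evenNumInRange(arr,query):
--     result=[]
--     for q in query:
--         start=q[0]
--         end=q[1]
--
--         count=0
--         for i in range(start,end+1):
--             if arr[i]%2==0:
--                 count+=1
--         result.append(count)
--
--     return result
-- ===== SOURCE B (Python) =====
-- def evenNumInRange(arr, query):
--     P = [0]
--     for x in arr:
--         P.append(P[-1] + (1 if x % 2 == 0 else 0))
--     return [P[e + 1] - P[s] if s <= e else 0 for s, e in query]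
-- ===== Notes on version B (the rewrite author's own statement) =====
-- stated objective: alternative
-- what changed: Replaces A's per-query rescan of arr (nested loops) with a prefix-sum table of even counts built once, answering each query by one subtraction.
-- outside the precondition, e.g. on evenNumInRange([2, 4, 6], [(-1, 1)]): A returns [3], B returns [-1]
import Mathlib
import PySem

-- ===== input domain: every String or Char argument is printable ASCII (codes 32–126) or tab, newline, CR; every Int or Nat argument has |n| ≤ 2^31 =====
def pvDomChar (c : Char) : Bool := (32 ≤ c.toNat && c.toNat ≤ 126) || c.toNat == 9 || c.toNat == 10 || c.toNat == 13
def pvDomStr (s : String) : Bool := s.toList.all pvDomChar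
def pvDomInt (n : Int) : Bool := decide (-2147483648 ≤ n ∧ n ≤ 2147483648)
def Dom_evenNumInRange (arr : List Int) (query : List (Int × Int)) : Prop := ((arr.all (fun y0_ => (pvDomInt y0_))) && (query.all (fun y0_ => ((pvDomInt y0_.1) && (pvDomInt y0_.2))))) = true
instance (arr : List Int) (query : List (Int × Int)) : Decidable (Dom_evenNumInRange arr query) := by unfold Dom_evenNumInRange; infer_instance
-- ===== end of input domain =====

-- B answers each query by subtracting two entries of a prefix-sum table of even counts built once.

-- ===== PORT A =====
def evenNumInRange (arr : List Int) (query : List (Int × Int)) : List Int :=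
  query.foldl (fun result q =>
    let start := q.1
    let «end» := q.2
    let count := (PySem.List.pyRange start («end» + 1) 1).foldl
      (fun count i =>
        if PySem.Int.mod (PySem.List.pyGetD arr i 0) 2 = 0 then count + 1 else count) 0
    result ++ [count]) []

-- ===== PORT B =====
def evenNumInRange_alt (arr : List Int) (query : List (Int × Int)) : List Int :=
  let P := arr.foldl (fun P x =>
    P ++ [PySem.List.pyGetD P (-1) 0 + (if PySem.Int.mod x 2 = 0 then 1 else 0)]) [0]
  query.map (fun q =>
    if q.1 ≤ q.2 then PySem.List.pyGetD P (q.2 + 1) 0 - PySem.List.pyGetD P q.1 0 else 0)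

-- ===== PRECONDITION & SPEC =====
-- Pre_ excludes queries with a nonempty range and a negative or out-of-bounds endpoint:
-- with end >= len(arr) A raises IndexError, and with a negative start A returns an accidental
-- count over a wrapped-around range via Python negative indexing — outside the task's natural
-- index domain, B's prefix-difference there is an equally accidental value.
def Pre_evenNumInRange (arr : List Int) (query : List (Int × Int)) : Prop :=
  ∀ q ∈ query, q.2 < q.1 ∨ (0 ≤ q.1 ∧ q.2 < (arr.length : Int))
instance (arr : List Int) (query : List (Int × Int)) : Decidable (Pre_evenNumInRange arr query) := by
  unfold Pre_evenNumInRange; infer_instance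

def pvWitness_evenNumInRange : List Int × (List (Int × Int)) :=
  ([2, 3, 4, 5], [(0, 3), (1, 2), (2, 2), (3, 1)])

def Spec_evenNumInRange (arr : List Int) (query : List (Int × Int)) (out : List Int) : Prop := out = evenNumInRange_alt arr query
instance (arr : List Int) (query : List (Int × Int)) (out : List Int) : Decidable (Spec_evenNumInRange arr query out) := by unfold Spec_evenNumInRange; infer_instance

-- ===== CLAIM (what is proved, stated in full; the proofs are below) =====
def Claim_equal_evenNumInRange : Prop := ∀ (arr : List Int) (query : List (Int × Int)), Dom_evenNumInRange arr query → Pre_evenNumInRange arr query → Spec_evenNumInRange arr query (evenNumInRange arr query)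

-- ===== LEMMAS AND PROOFS =====

-- number of evens among the first k elements, as an Int
def pvPref (arr : List Int) (k : Nat) : Int :=
  ((arr.take k).countP (fun x => decide (PySem.Int.mod x 2 = 0)) : Int)

theorem pvPref_succ (arr : List Int) (k : Nat) (hk : k < arr.length) :
    pvPref arr (k + 1) = pvPref arr k + (if PySem.Int.mod arr[k] 2 = 0 then 1 else 0) := by
  unfold pvPref
  rw [List.take_add_one, List.countP_append, List.getElem?_eq_getElem hk]
  simp [List.countP_cons]

theorem pvPref_frozen (l l' : List Int) (k : Nat) (hk : k ≤ l.length) :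
    pvPref (l ++ l') k = pvPref l k := by
  unfold pvPref
  rw [List.take_append_of_le_length hk]

-- A's inner loop computes a prefix difference
theorem pvCountA (arr : List Int) : ∀ (k : Nat) (s b : Int), 0 ≤ s → s ≤ b →
    b ≤ (arr.length : Int) → (b - s).toNat = k →
    (PySem.List.pyRange s b 1).foldl
      (fun count i => if PySem.Int.mod (PySem.List.pyGetD arr i 0) 2 = 0 then count + 1 else count) 0
    = pvPref arr b.toNat - pvPref arr s.toNat := by
  intro k
  induction k with
  | zero =>
    intro s b h0 hsb hb hk
    have : b = s := by omega
    subst this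
    rw [PySem.List.pyRange_one_eq_nil (by omega)]
    simp
  | succ k ih =>
    intro s b h0 hsb hb hk
    have hsplit : PySem.List.pyRange s b 1
        = PySem.List.pyRange s (b - 1) 1 ++ [b - 1] := by
      have h := PySem.List.pyRange_one_succ_right (a := s) (b := b - 1) (by omega)
      have e : b - 1 + 1 = b := by omega
      rw [e] at h
      exact h
    rw [hsplit, List.foldl_append]
    rw [ih s (b - 1) h0 (by omega) (by omega) (by omega)]
    have hidx : (b - 1).toNat < arr.length := by omega
    have hbt : b.toNat = (b - 1).toNat + 1 := by omega
    rw [hbt, pvPref_succ arr (b - 1).toNat hidx]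
    simp only [List.foldl_cons, List.foldl_nil]
    rw [PySem.List.pyGetD_eq_getElem arr 0 (show (0:Int) ≤ b - 1 by omega)
      (show b - 1 < (arr.length : Int) by omega)]
    split_ifs <;> omega

-- B's fold builds the full prefix table
theorem pvPtable (arr : List Int) :
    arr.foldl (fun P x =>
      P ++ [PySem.List.pyGetD P (-1) 0 + (if PySem.Int.mod x 2 = 0 then 1 else 0)]) [0]
    = (List.range (arr.length + 1)).map (fun k => pvPref arr k) := by
  induction arr using List.reverseRecOn with
  | nil => simp [pvPref]
  | append_singleton l x ih =>
    rw [List.foldl_append, ih]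
    simp only [List.foldl_cons, List.foldl_nil, List.length_append, List.length_cons,
      List.length_nil, Nat.zero_add]
    have hmap : (List.range (l.length + 1)).map (fun k => pvPref (l ++ [x]) k)
        = (List.range (l.length + 1)).map (fun k => pvPref l k) :=
      List.map_congr_left (fun k hk => pvPref_frozen l [x] k (by
        simp only [List.mem_range] at hk; omega))
    have hsplit : (List.range (l.length + 1)).map (fun k => pvPref l k)
        = (List.range l.length).map (fun k => pvPref l k) ++ [pvPref l l.length] := by
      rw [List.range_succ, List.map_append]
      rfl
    rw [List.range_succ (n := l.length + 1), List.map_append, hmap]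
    congr 1
    rw [hsplit, PySem.List.pyGetD_neg_one_append_singleton]
    have hx : pvPref (l ++ [x]) (l.length + 1)
        = pvPref (l ++ [x]) l.length + (if PySem.Int.mod x 2 = 0 then 1 else 0) := by
      have h := pvPref_succ (l ++ [x]) l.length (by simp)
      simpa using h
    simp only [List.map_cons, List.map_nil]
    rw [hx, pvPref_frozen l [x] l.length (le_refl _)]

theorem pvPget (arr : List Int) (t : Int) (h0 : 0 ≤ t) (ht : t ≤ (arr.length : Int)) :
    PySem.List.pyGetD ((List.range (arr.length + 1)).map (fun k => pvPref arr k)) t 0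
    = pvPref arr t.toNat := by
  rw [PySem.List.pyGetD_eq_getElem _ 0 h0 (by simp; omega)]
  simp

-- ===== VERDICT (by name: the statement is the Claim_ definition above) =====
theorem evenNumInRange_spec : Claim_equal_evenNumInRange := by
  intro arr query _ hpre
  unfold Spec_evenNumInRange evenNumInRange evenNumInRange_alt
  rw [PySem.List.foldl_append_singleton_eq_map]
  rw [pvPtable]
  apply List.map_congr_left
  intro q hq
  rcases hpre q hq with hlt | ⟨h0, hn⟩
  · rw [if_neg (by omega), PySem.List.pyRange_one_eq_nil (by omega)]
    simp
  · by_cases hse : q.1 ≤ q.2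
    · rw [if_pos hse]
      rw [pvPget arr (q.2 + 1) (by omega) (by omega), pvPget arr q.1 h0 (by omega)]
      exact pvCountA arr (q.2 + 1 - q.1).toNat q.1 (q.2 + 1) h0 (by omega) (by omega) rfl
    · rw [if_neg hse, PySem.List.pyRange_one_eq_nil (by omega)]
      simp
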